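-- pv_equiv track=rewrite | github.com/UGeunJi/Coding_Test_Practice | baekjoon/Bronze - 3/[23809].py | golbange_print
-- ===== SOURCE A (Python) =====
-- def golbange_print(n):
--     answer = ['' for _ in range(n * 5)]
--
--     for idx in range(n * 5):
--         if 2 * n - 1 < idx < 2 * n + n:
--             answer[idx] = "@" * (n * 3)
--         elif idx < 2 * n:
--             answer[idx] = f"{'@' * n}{((3 - (idx // n)) * n) * ' '}{'@' * (n)}"
--         else:
--             answer[idx] = f"{'@' * n}{((idx // n) * n - n ) * ' '}{'@' * (n)}"
--
--     return "\n".join(answer)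
-- ===== SOURCE B (Python) =====
-- def golbange_print(n):
--     at = '@' * n
--     a = at + ' ' * (3 * n) + at
--     b = at + ' ' * (2 * n) + at
--     c = '@' * (3 * n)
--     return "\n".join([a] * n + [b] * n + [c] * n + [b] * n + [a] * n)
-- ===== Notes on version B (the rewrite author's own statement) =====
-- stated objective: simpler
-- what changed: Replaces the per-index loop with its floordiv branch logic by precomputing the three distinct line strings once and concatenating five replicated blocks, exploiting the pattern's vertical symmetry.
import Mathlib
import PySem

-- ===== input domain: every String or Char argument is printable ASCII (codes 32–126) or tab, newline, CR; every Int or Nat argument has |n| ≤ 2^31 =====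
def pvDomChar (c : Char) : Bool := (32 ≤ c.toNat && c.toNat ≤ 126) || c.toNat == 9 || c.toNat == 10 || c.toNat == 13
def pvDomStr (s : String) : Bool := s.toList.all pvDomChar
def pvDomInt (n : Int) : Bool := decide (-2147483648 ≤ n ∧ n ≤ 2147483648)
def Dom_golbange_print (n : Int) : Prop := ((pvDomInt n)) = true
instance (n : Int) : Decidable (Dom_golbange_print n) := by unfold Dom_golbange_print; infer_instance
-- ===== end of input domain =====

-- B precomputes the three distinct line strings and joins five replicated blocks (vertical symmetry) instead of branching per index; objective: simpler.


-- ===== PORT A =====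
-- '@' * k  (Python string repetition; negative k gives '') is List.replicate k.toNat, exact.
def golbange_print (n : Int) : String :=
  let answer : List String :=
    (PySem.List.pyRange 0 (n * 5) 1).map (fun idx =>
      if 2 * n - 1 < idx ∧ idx < 2 * n + n then
        String.ofList (List.replicate (n * 3).toNat '@')
      else if idx < 2 * n then
        String.ofList (List.replicate n.toNat '@' ++
                   List.replicate ((3 - PySem.Int.floordiv idx n) * n).toNat ' ' ++
                   List.replicate n.toNat '@')
      else
        String.ofList (List.replicate n.toNat '@' ++
                   List.replicate (PySem.Int.floordiv idx n * n - n).toNat ' ' ++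
                   List.replicate n.toNat '@'))
  PySem.Str.join "\n" answer

-- ===== PORT B =====
def golbange_print_alt (n : Int) : String :=
  let att := List.replicate n.toNat '@'
  let a := String.ofList (att ++ List.replicate (3 * n).toNat ' ' ++ att)
  let b := String.ofList (att ++ List.replicate (2 * n).toNat ' ' ++ att)
  let c := String.ofList (List.replicate (3 * n).toNat '@')
  PySem.Str.join "\n"
    (List.replicate n.toNat a ++ List.replicate n.toNat b ++ List.replicate n.toNat c ++
     List.replicate n.toNat b ++ List.replicate n.toNat a)

-- ===== PRECONDITION & SPEC =====
def Spec_golbange_print (n : Int) (out : String) : Prop := out = golbange_print_alt n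
instance (n : Int) (out : String) : Decidable (Spec_golbange_print n out) := by unfold Spec_golbange_print; infer_instance

-- ===== CLAIM (what is proved, stated in full; the proofs are below) =====
def Claim_equal_golbange_print : Prop := ∀ (n : Int), Dom_golbange_print n → Spec_golbange_print n (golbange_print n)

-- ===== LEMMAS AND PROOFS =====

-- a map that is constant on a list is a replicate
theorem pv_map_const {α β : Type} (l : List α) (f : α → β) (v : β)
    (h : ∀ x ∈ l, f x = v) : l.map f = List.replicate l.length v := by
  induction l with
  | nil => rfl
  | cons x xs ih =>
    simp only [List.map_cons, List.length_cons, List.replicate_succ]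
    rw [h x (by simp), ih (fun y hy => h y (by simp [hy]))]

-- on k*n ≤ x < (k+1)*n with n > 0, x // n = k
theorem pv_floordiv_block (n x k : Int) (hn : 0 < n) (h1 : k * n ≤ x) (h2 : x < (k + 1) * n) :
    PySem.Int.floordiv x n = k := by
  have hle : k ≤ PySem.Int.floordiv x n := (PySem.Int.le_floordiv_iff_mul_le hn).mpr h1
  have hlt : PySem.Int.floordiv x n < k + 1 := (PySem.Int.floordiv_lt_iff_lt_mul hn).mpr h2
  omega

theorem pv_lines_eq (n : Int) (hn : 0 < n) :
    (PySem.List.pyRange 0 (n * 5) 1).map (fun idx =>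
      if 2 * n - 1 < idx ∧ idx < 2 * n + n then
        String.ofList (List.replicate (n * 3).toNat '@')
      else if idx < 2 * n then
        String.ofList (List.replicate n.toNat '@' ++
                   List.replicate ((3 - PySem.Int.floordiv idx n) * n).toNat ' ' ++
                   List.replicate n.toNat '@')
      else
        String.ofList (List.replicate n.toNat '@' ++
                   List.replicate (PySem.Int.floordiv idx n * n - n).toNat ' ' ++
                   List.replicate n.toNat '@')) =
    (List.replicate n.toNat (String.ofList (List.replicate n.toNat '@' ++ List.replicate (3 * n).toNat ' ' ++ List.replicate n.toNat '@')) ++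
     List.replicate n.toNat (String.ofList (List.replicate n.toNat '@' ++ List.replicate (2 * n).toNat ' ' ++ List.replicate n.toNat '@')) ++
     List.replicate n.toNat (String.ofList (List.replicate (3 * n).toNat '@')) ++
     List.replicate n.toNat (String.ofList (List.replicate n.toNat '@' ++ List.replicate (2 * n).toNat ' ' ++ List.replicate n.toNat '@')) ++
     List.replicate n.toNat (String.ofList (List.replicate n.toNat '@' ++ List.replicate (3 * n).toNat ' ' ++ List.replicate n.toNat '@'))) := by
  have hsplit : PySem.List.pyRange 0 (n * 5) 1 =
      PySem.List.pyRange 0 n 1 ++ PySem.List.pyRange n (2 * n) 1 ++ PySem.List.pyRange (2 * n) (3 * n) 1 ++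
      PySem.List.pyRange (3 * n) (4 * n) 1 ++ PySem.List.pyRange (4 * n) (n * 5) 1 := by
    rw [PySem.List.pyRange_one_append 0 n (n * 5) (by omega) (by nlinarith),
        PySem.List.pyRange_one_append n (2 * n) (n * 5) (by omega) (by nlinarith),
        PySem.List.pyRange_one_append (2 * n) (3 * n) (n * 5) (by omega) (by nlinarith),
        PySem.List.pyRange_one_append (3 * n) (4 * n) (n * 5) (by omega) (by nlinarith)]
    simp [List.append_assoc]
  rw [hsplit]
  simp only [List.map_append]
  have hlen : ∀ a b : Int, b - a = n → (PySem.List.pyRange a b 1).length = n.toNat := by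
    intro a b hab; rw [PySem.List.length_pyRange_one, hab]
  congr 1
  · congr 1
    · congr 1
      · congr 1
        · -- block 0: 0 ≤ x < n, floordiv = 0
          rw [pv_map_const _ _ _ ?_, hlen 0 n (by omega)]
          intro x hx
          rw [PySem.List.mem_pyRange_one] at hx
          have hfd : PySem.Int.floordiv x n = 0 := pv_floordiv_block n x 0 hn (by omega) (by omega)
          rw [if_neg (by omega), if_pos (by omega), hfd]
          norm_num
        · -- block 1: n ≤ x < 2n, floordiv = 1
          rw [pv_map_const _ _ _ ?_, hlen n (2 * n) (by omega)]
          intro x hx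
          rw [PySem.List.mem_pyRange_one] at hx
          have hfd : PySem.Int.floordiv x n = 1 := pv_floordiv_block n x 1 hn (by omega) (by omega)
          rw [if_neg (by omega), if_pos (by omega), hfd]
          norm_num
      · -- block 2: 2n ≤ x < 3n, middle branch
        rw [pv_map_const _ _ _ ?_, hlen (2 * n) (3 * n) (by omega)]
        intro x hx
        rw [PySem.List.mem_pyRange_one] at hx
        rw [if_pos (by omega)]
        norm_num [mul_comm]
    · -- block 3: 3n ≤ x < 4n, floordiv = 3
      rw [pv_map_const _ _ _ ?_, hlen (3 * n) (4 * n) (by omega)]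
      intro x hx
      rw [PySem.List.mem_pyRange_one] at hx
      have hfd : PySem.Int.floordiv x n = 3 := pv_floordiv_block n x 3 hn (by omega) (by omega)
      rw [if_neg (by omega), if_neg (by omega), hfd]
      have h32 : (3 : Int) * n - n = 2 * n := by ring
      rw [h32]
  · -- block 4: 4n ≤ x < 5n, floordiv = 4
    rw [pv_map_const _ _ _ ?_, hlen (4 * n) (n * 5) (by omega)]
    intro x hx
    rw [PySem.List.mem_pyRange_one] at hx
    have hfd : PySem.Int.floordiv x n = 4 := pv_floordiv_block n x 4 hn (by omega) (by omega)
    rw [if_neg (by omega), if_neg (by omega), hfd]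
    have h43 : (4 : Int) * n - n = 3 * n := by ring
    rw [h43]

-- ===== VERDICT (by name: the statement is the Claim_ definition above) =====
theorem golbange_print_spec : Claim_equal_golbange_print := by
  intro n _
  unfold Spec_golbange_print golbange_print golbange_print_alt
  by_cases hn : 0 < n
  · simp only []
    rw [pv_lines_eq n hn]
  · have h1 : PySem.List.pyRange 0 (n * 5) 1 = [] := PySem.List.pyRange_one_eq_nil (by nlinarith)
    have h2 : n.toNat = 0 := by omega
    simp [h1, h2]
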